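-- pv_equiv track=rewrite | github.com/ydb-platform/ydb | contrib/python/ezdxf/ezdxf/tools/debug.py | group_chars
-- ===== SOURCE A (Python) =====
-- def group_chars(s: str, n: int = 4, sep="-") -> str:
--     chars = []
--     for index, char in enumerate(reversed(s)):
--         if index % n == 0:
--             chars.append(sep)
--         chars.append(char)
--     if chars:
--         chars.reverse()
--         chars.pop()
--         return "".join(chars)
--     return ""
-- ===== SOURCE B (Python) =====
-- def group_chars(s: str, n: int = 4, sep="-") -> str:
--     if not s:
--         return ""
--     m = abs(n)
--     first = len(s) % m
--     parts = [] if first == 0 else [s[:first]]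
--     for i in range(first, len(s), m):
--         parts.append(s[i:i + m])
--     return sep.join(parts)
-- ===== Notes on version B (the rewrite author's own statement) =====
-- stated objective: simpler
-- what changed: B slices the string into right-aligned chunks of size abs(n) (a possibly shorter leftmost chunk of len(s) % abs(n), then full chunks by index steps) and sep.join's them, instead of A's per-character accumulation over the reversed string followed by reverse/pop.
import Mathlib
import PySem

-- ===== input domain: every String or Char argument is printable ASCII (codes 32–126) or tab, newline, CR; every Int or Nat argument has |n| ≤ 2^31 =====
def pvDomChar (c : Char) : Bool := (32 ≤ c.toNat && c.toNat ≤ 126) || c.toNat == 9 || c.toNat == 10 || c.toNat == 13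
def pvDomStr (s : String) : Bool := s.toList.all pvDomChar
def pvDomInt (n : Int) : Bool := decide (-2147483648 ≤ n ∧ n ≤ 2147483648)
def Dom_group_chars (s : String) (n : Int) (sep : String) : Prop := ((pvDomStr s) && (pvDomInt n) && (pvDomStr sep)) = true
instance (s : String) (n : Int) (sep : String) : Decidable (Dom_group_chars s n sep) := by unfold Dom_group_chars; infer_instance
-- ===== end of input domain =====

-- B groups by slicing m-sized chunks left to right (first chunk = len % m) and joins them,
-- instead of A's per-char accumulation over the reversed string; objective: simpler.

-- ===== PORT A =====
def group_chars (s : String) (n : Int) (sep : String) : String :=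
  let chars : List String :=
    (PySem.List.enumerate s.toList.reverse).foldl
      (fun chars iv =>
        let chars := if PySem.Int.mod iv.1 n == 0 then chars ++ [sep] else chars
        chars ++ [String.ofList [iv.2]])
      []
  if chars ≠ [] then
    PySem.Str.join "" chars.reverse.dropLast
  else ""

-- ===== PORT B =====
def group_chars_alt (s : String) (n : Int) (sep : String) : String :=
  if s = "" then ""
  else
    let m : Int := |n|
    let first : Int := PySem.Int.mod (PySem.Str.len s) m
    let parts : List String :=
      if first == 0 then [] else [PySem.Str.slice s none (some first)]
    let parts :=
      (PySem.List.pyRange first (PySem.Str.len s) m).foldl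
        (fun parts i => parts ++ [PySem.Str.slice s (some i) (some (i + m))]) parts
    PySem.Str.join sep parts

-- ===== PRECONDITION & SPEC =====
-- Pre_ excludes only non-empty s with n = 0, where BOTH programs raise ZeroDivisionError.
def Pre_group_chars (s : String) (n : Int) (sep : String) : Prop := s = "" ∨ n ≠ 0
instance (s : String) (n : Int) (sep : String) : Decidable (Pre_group_chars s n sep) := by
  unfold Pre_group_chars; infer_instance

def pvWitness_group_chars : String × Int × String := ("abcdefg", 3, "-")

def Spec_group_chars (s : String) (n : Int) (sep : String) (out : String) : Prop := out = group_chars_alt s n sep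
instance (s : String) (n : Int) (sep : String) (out : String) : Decidable (Spec_group_chars s n sep out) := by unfold Spec_group_chars; infer_instance

-- ===== CLAIM (what is proved, stated in full; the proofs are below) =====
def Claim_equal_group_chars : Prop := ∀ (s : String) (n : Int) (sep : String), Dom_group_chars s n sep → Pre_group_chars s n sep → Spec_group_chars s n sep (group_chars s n sep)

-- ===== LEMMAS AND PROOFS =====

-- common model: right-aligned grouping of the char list, one char at a time
def grp (m : Nat) (sep : List Char) : List Char → List Char
  | [] => []
  | c :: L => c :: (if L = [] then [] else (if L.length % m = 0 then sep else []) ++ grp m sep L)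

-- k chunks of size m taken from the front
def chunksE (m : Nat) : Nat → List Char → List (List Char)
  | 0, _ => []
  | k + 1, L => L.take m :: chunksE m k (L.drop m)

-- A's accumulated list of strings, as a function of the char list
def chA (n : Int) (sep : String) (L : List Char) : List String :=
  (PySem.List.enumerate L.reverse).foldl
    (fun chars iv =>
      let chars := if PySem.Int.mod iv.1 n == 0 then chars ++ [sep] else chars
      chars ++ [String.ofList [iv.2]])
    []

theorem grp_chunk (m : Nat) (sepL : List Char) :
    ∀ (chunk rest : List Char), chunk ≠ [] → chunk.length ≤ m → rest.length % m = 0 →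
    grp m sepL (chunk ++ rest) =
      chunk ++ (if rest = [] then [] else sepL ++ grp m sepL rest)
  | [], _, h1, _, _ => absurd rfl h1
  | [c], rest, _, h2, hr => by
    rcases rest with _ | ⟨r, rest'⟩
    · simp [grp]
    · have hr' : (rest'.length + 1) % m = 0 := by simpa using hr
      simp only [List.singleton_append, grp]
      simp [hr']
  | c :: c' :: chunk', rest, _, h2, hr => by
    have ih := grp_chunk m sepL (c' :: chunk') rest (by simp) (by simp at h2 ⊢; omega) hr
    rw [List.cons_append]
    simp only [grp]
    have hne : (c' :: chunk') ++ rest ≠ [] := by simp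
    have hlen : ((c' :: chunk') ++ rest).length % m ≠ 0 := by
      have hlt : (c' :: chunk').length < m := by simp at h2 ⊢; omega
      rcases Nat.dvd_of_mod_eq_zero hr with ⟨t, ht⟩
      simp only [List.length_append, ht, Nat.add_mul_mod_self_left]
      rw [Nat.mod_eq_of_lt hlt]
      simp
    rw [if_neg hne, if_neg hlen, ih]
    simp

theorem join_chunksE (m : Nat) (hm : 0 < m) (sepL : List Char) :
    ∀ (k : Nat) (L : List Char), L.length = k * m → 0 < k →
      PySem.Chars.join sepL (chunksE m k L) = grp m sepL L := by
  intro k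
  induction k with
  | zero => intro L h hk; omega
  | succ k ih =>
    intro L hlen _
    rcases Nat.eq_zero_or_pos k with hk0 | hkpos
    · subst hk0
      have hLm : L.length = m := by simpa using hlen
      have : L.take m = L := List.take_of_length_le (by omega)
      rw [chunksE, chunksE, this, PySem.Chars.join_singleton]
      have := grp_chunk m sepL L [] (by intro h; subst h; simp at hLm; omega) (by omega) (by simp)
      simpa using this.symm
    · have hsm : (k + 1) * m = k * m + m := Nat.succ_mul k m
      have hpos : 0 < k * m := Nat.mul_pos hkpos hm
      have hdlen : (L.drop m).length = k * m := by simp; omega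
      have hchunk : chunksE m k (L.drop m) ≠ [] := by
        rcases k with _ | k
        · omega
        · rw [chunksE]; simp
      rw [chunksE]
      rcases hc : chunksE m k (L.drop m) with _ | ⟨p, ps⟩
      · exact absurd hc hchunk
      · rw [PySem.Chars.join_cons_cons, ← hc, ih (L.drop m) hdlen hkpos]
        have hsplit : L = L.take m ++ L.drop m := (List.take_append_drop m L).symm
        have := grp_chunk m sepL (L.take m) (L.drop m)
          (by
            have hLpos : 0 < L.length := by rw [hlen, hsm]; omega
            intro h; rw [List.take_eq_nil_iff] at h
            rcases h with h | h
            · omega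
            · rw [h] at hLpos; simp at hLpos)
          (by simp) (by rw [hdlen]; simp)
        rw [← hsplit] at this
        rw [this, if_neg (by intro h; rw [h] at hdlen; simp at hdlen; omega)]
        simp

theorem pyRange_cons_of_lt (a b m : Int) (hm : 0 < m) (hab : a < b) :
    PySem.List.pyRange a b m = a :: PySem.List.pyRange (a + m) b m := by
  rw [PySem.List.pyRange_of_pos a b hm, PySem.List.pyRange_of_pos (a+m) b hm]
  by_cases h2 : a + m < b
  · simp only [if_pos hab, if_pos h2]
    have key : (b - a + m - 1) / m = (b - (a + m) + m - 1) / m + 1 := by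
      have : b - a + m - 1 = (b - (a+m) + m - 1) + 1 * m := by ring
      rw [this, Int.add_mul_ediv_right _ _ (by omega)]
    have hnn : 0 ≤ (b - (a + m) + m - 1) / m := Int.ediv_nonneg (by omega) (by omega)
    rw [key, show ((b - (a + m) + m - 1) / m + 1).toNat = ((b - (a + m) + m - 1) / m).toNat + 1 by omega,
       List.range_succ_eq_map]
    simp only [List.map_cons, List.map_map, Nat.cast_zero, mul_zero, add_zero]
    congr 1
    apply List.map_congr_left
    intro k _
    simp [Function.comp, Nat.succ_eq_add_one]
    ring
  · simp only [if_pos hab, if_neg h2]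
    have hone : (b - a + m - 1) / m = 1 := by
      rw [← PySem.Int.floordiv_eq_ediv_of_pos hm]
      exact (PySem.Int.floordiv_eq_iff_of_pos hm).mpr ⟨by omega, by omega⟩
    rw [hone]
    simp

theorem B_chunks (m : Nat) (hm : 0 < m) :
    ∀ (k : Nat) (L : List Char) (f : Nat), L.length = f + k * m →
      (PySem.List.pyRange (f : Int) (L.length : Int) (m : Int)).map
          (fun i => PySem.List.slice L (some i) (some (i + (m : Int)))) =
        chunksE m k (L.drop f) := by
  intro k
  induction k with
  | zero =>
    intro L f hlen
    have hLf : L.length = f := by simpa using hlen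
    rw [PySem.List.pyRange_of_pos _ _ (by exact_mod_cast hm)]
    simp [hLf, chunksE]
  | succ k ih =>
    intro L f hlen
    have hsm : (k + 1) * m = k * m + m := Nat.succ_mul k m
    have hlt : (f : Int) < (L.length : Int) := by
      have : f < L.length := by omega
      exact_mod_cast this
    rw [pyRange_cons_of_lt _ _ _ (by exact_mod_cast hm) hlt, List.map_cons]
    rw [PySem.List.slice_natCast_add]
    rw [show (f : Int) + (m : Int) = ((f + m : Nat) : Int) by push_cast; ring]
    rw [ih L (f + m) (by omega)]
    show _ :: _ = chunksE m (k+1) (L.drop f)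
    rw [chunksE, List.take_drop, List.drop_drop]

theorem flatMap_singleton_eq_map {α β : Type} (l : List α) (f : α → β) :
    l.flatMap (fun x => [f x]) = l.map f := by
  induction l with
  | nil => rfl
  | cons x xs ih => simp [ih]

theorem chA_step (n : Int) (sep : String) (L : List Char) (c : Char) :
    chA n sep (c :: L) =
      chA n sep L ++
        ((if PySem.Int.mod (L.length : Int) n == 0 then [sep] else []) ++ [String.ofList [c]]) := by
  unfold chA
  rw [List.reverse_cons, PySem.List.enumerate_append, List.foldl_append]
  simp only [PySem.List.enumerate_cons, PySem.List.enumerate_nil, List.length_reverse,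
    List.foldl_cons, List.foldl_nil, Int.zero_add]
  split <;> simp

theorem chA_ne_nil (n : Int) (sep : String) (L : List Char) (h : L ≠ []) : chA n sep L ≠ [] := by
  rcases L with _ | ⟨c, L'⟩
  · exact absurd rfl h
  · rw [chA_step]; simp

theorem modcond (n : Int) (hn : n ≠ 0) (k : Nat) :
    (PySem.Int.mod (k : Int) n == 0) = decide (k % n.natAbs = 0) := by
  rw [Bool.eq_iff_iff]
  simp only [beq_iff_eq, decide_eq_true_eq, PySem.Int.mod_eq_zero_iff_dvd]
  rw [← Int.natAbs_dvd_natAbs]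
  simp [Nat.dvd_iff_mod_eq_zero]

theorem join_nil_flatten : ∀ (parts : List (List Char)),
    PySem.Chars.join [] parts = parts.flatten
  | [] => by simp [PySem.Chars.join_nil]
  | [p] => by simp [PySem.Chars.join_singleton]
  | p :: q :: rest => by
      rw [PySem.Chars.join_cons_cons]
      simp [join_nil_flatten (q :: rest)]

theorem reverse_dropLast_eq_tail_reverse {α : Type} (l : List α) :
    l.reverse.dropLast = l.tail.reverse := by
  rcases l with _ | ⟨a, t⟩
  · rfl
  · simp [List.reverse_cons]

theorem A_side (n : Int) (hn : n ≠ 0) (sep : String) :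
    ∀ (L : List Char), L ≠ [] →
      ((chA n sep L).reverse.dropLast.map String.toList).flatten =
        grp n.natAbs sep.toList L
  | [], h => absurd rfl h
  | [c], _ => by
    have h0 : PySem.Int.mod 0 n = 0 := (PySem.Int.mod_eq_zero_iff_dvd 0 n).mpr (dvd_zero n)
    have hch : chA n sep [c] = [sep, String.ofList [c]] := by
      have := chA_step n sep [] c
      simpa [chA, h0] using this
    rw [hch]
    simp [grp]
  | c :: c' :: L', _ => by
    have ih := A_side n hn sep (c' :: L') (by simp)
    rw [chA_step n sep (c' :: L') c]
    rw [reverse_dropLast_eq_tail_reverse]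
    rw [List.tail_append_of_ne_nil (chA_ne_nil n sep (c' :: L') (by simp))]
    rw [List.reverse_append, List.map_append, List.flatten_append]
    rw [← reverse_dropLast_eq_tail_reverse, ih]
    rw [modcond n hn]
    simp only [grp]
    by_cases h : (L'.length + 1) % n.natAbs = 0 <;> simp [h]

theorem A_main (n : Int) (hn : n ≠ 0) (sep : String) (s : String) (hs : s ≠ "") :
    (group_chars s n sep).toList = grp n.natAbs sep.toList s.toList := by
  have hL : s.toList ≠ [] := by
    intro h
    exact hs (by rw [← String.toList_inj] at *; simpa using h)
  have hform : group_chars s n sep =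
      if chA n sep s.toList ≠ [] then
        PySem.Str.join "" (chA n sep s.toList).reverse.dropLast
      else "" := rfl
  rw [hform, if_pos (chA_ne_nil n sep s.toList hL), PySem.Str.toList_join]
  have : ("" : String).toList = [] := rfl
  rw [this, join_nil_flatten]
  exact A_side n hn sep s.toList hL

theorem B_side (n : Int) (hn : n ≠ 0) (sep : String) (s : String) (hs : s ≠ "") :
    (group_chars_alt s n sep).toList = grp n.natAbs sep.toList s.toList := by
  have hL : s.toList ≠ [] := by
    intro h
    exact hs (by rw [← String.toList_inj] at *; simpa using h)
  set L := s.toList with hLdef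
  set m := n.natAbs with hmdef
  have hm : 0 < m := by omega
  have habs : |n| = (m : Int) := by rw [hmdef]; exact Int.abs_eq_natAbs n
  have hlen0 : 0 < L.length := List.length_pos_iff.mpr hL
  unfold group_chars_alt
  rw [if_neg hs]
  dsimp only
  rw [habs, PySem.Str.len_eq, ← hLdef, PySem.Int.mod_natCast]
  rw [PySem.List.foldl_append_eq_flatMap (fun i => [PySem.Str.slice s (some i) (some (i + (m:Int)))])]
  rw [flatMap_singleton_eq_map, PySem.Str.toList_join, List.map_append, List.map_map]
  have hslice : (String.toList ∘ fun i => PySem.Str.slice s (some i) (some (i + (m:Int)))) =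
      (fun i => PySem.List.slice L (some i) (some (i + (m:Int)))) := by
    funext i
    simp only [Function.comp_apply]
    rw [PySem.Str.toList_slice, PySem.Chars.slice_eq_listSlice, ← hLdef]
  set f := L.length % m with hfdef
  have hfm : f < m := Nat.mod_lt _ hm
  have hdiv : L.length = f + (L.length / m) * m := by
    rw [hfdef]
    have := Nat.mod_add_div L.length m
    rw [Nat.mul_comm] at this
    omega
  by_cases hf : f = 0
  · rw [show (((f : Nat) : Int) == (0:Int)) = true by simp [hf]]
    rw [hslice, B_chunks m hm (L.length / m) L f hdiv]
    have hk : 0 < L.length / m := by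
      rcases Nat.eq_zero_or_pos (L.length / m) with h | h
      · rw [h] at hdiv; omega
      · exact h
    have hdropf : L.drop f = L := by rw [hf]; simp
    rw [hdropf]
    exact join_chunksE m hm sep.toList (L.length / m) L (by omega) hk
  · rw [show (((f : Nat) : Int) == (0:Int)) = false by simp [hf]]
    simp only [Bool.false_eq_true, if_false, List.map_cons, List.map_nil, List.cons_append,
      List.nil_append]
    rw [hslice, B_chunks m hm (L.length / m) L f hdiv]
    have htake : (PySem.Str.slice s none (some ((f:Nat):Int))).toList = L.take f := by
      rw [PySem.Str.toList_slice, PySem.Chars.slice_eq_listSlice, ← hLdef,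
        PySem.List.slice_to_natCast]
    rw [htake]
    have htk_ne : L.take f ≠ [] := by
      intro h; rw [List.take_eq_nil_iff] at h
      rcases h with h | h
      · exact hf h
      · exact hL h
    rcases Nat.eq_zero_or_pos (L.length / m) with hk | hk
    · -- single chunk: the whole string
      rw [hk, chunksE, PySem.Chars.join_singleton]
      have hfl : f = L.length := by rw [hk] at hdiv; simpa using hdiv.symm
      have : L.take f = L := by rw [hfl]; simp
      rw [this]
      have := grp_chunk m sep.toList L [] hL (le_of_lt (hfl ▸ hfm)) (by simp)
      simpa using this.symm
    · have hdlen : (L.drop f).length = (L.length / m) * m := by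
        rw [List.length_drop]
        have key := hdiv
        generalize hB : L.length / m * m = B at key ⊢
        omega
      have hdne : L.drop f ≠ [] := by
        intro h; rw [h] at hdlen
        rw [List.length_nil, eq_comm, Nat.mul_eq_zero] at hdlen
        rcases hdlen with h1 | h1 <;> omega
      have hchunk_ne : chunksE m (L.length / m) (L.drop f) ≠ [] := by
        rcases hkk : L.length / m with _ | k
        · omega
        · rw [chunksE]; simp
      rcases hc : chunksE m (L.length / m) (L.drop f) with _ | ⟨p, ps⟩
      · exact absurd hc hchunk_ne
      · rw [PySem.Chars.join_cons_cons, ← hc,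
          join_chunksE m hm sep.toList (L.length / m) (L.drop f) hdlen hk]
        have := grp_chunk m sep.toList (L.take f) (L.drop f) htk_ne
          (by simp [hfdef]; omega) (by rw [hdlen]; simp)
        rw [List.take_append_drop] at this
        rw [this, if_neg hdne]
        simp

-- ===== VERDICT (by name: the statement is the Claim_ definition above) =====
theorem group_chars_spec : Claim_equal_group_chars := by
  intro s n sep _hdom hpre
  unfold Spec_group_chars
  by_cases hs : s = ""
  · subst hs; rfl
  · have hn : n ≠ 0 := by
      rcases hpre with h | h
      · exact absurd h hs
      · exact h
    apply String.toList_inj.mp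
    rw [A_main n hn sep s hs, B_side n hn sep s hs]
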